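-- pv_equiv track=rewrite | github.com/Akshayanti/advent-of-code | 2024/d15/d15.py | get_blocking_boxes
-- ===== SOURCE A (Python) =====
-- def get_blocking_boxes(matrix, x, y, given_direction, visited=None):
--     if visited is None:
--         visited = set()
--
--     if (x, y) in visited:
--         return visited
--
--     visited.add((x, y))
--
--     dx, dy = given_direction
--     nx, ny = x + dx, y + dy
--     if 0 <= nx < len(matrix) and 0 <= ny < len(matrix[0]) and matrix[nx][ny] in ['[', ']']:
--         if matrix[nx][ny] == "[":
--             get_blocking_boxes(matrix, nx, ny, given_direction, visited)
--             get_blocking_boxes(matrix, nx, ny+1, given_direction, visited)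
--         elif matrix[nx][ny] == "]":
--             get_blocking_boxes(matrix, nx, ny, given_direction, visited)
--             get_blocking_boxes(matrix, nx, ny-1, given_direction, visited)
--     return visited
-- ===== SOURCE B (Python) =====
-- def get_blocking_boxes(matrix, x, y, given_direction, visited=None):
--     if visited is None:
--         visited = set()
--     dx, dy = given_direction
--     stack = [(x, y)]
--     while stack:
--         cx, cy = stack.pop()
--         if (cx, cy) in visited:
--             continue
--         visited.add((cx, cy))
--         nx, ny = cx + dx, cy + dy
--         if 0 <= nx < len(matrix) and 0 <= ny < len(matrix[0]):
--             cell = matrix[nx][ny]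
--             if cell == '[':
--                 stack.append((nx, ny + 1))
--                 stack.append((nx, ny))
--             elif cell == ']':
--                 stack.append((nx, ny - 1))
--                 stack.append((nx, ny))
--     return visited
-- ===== Notes on version B (the rewrite author's own statement) =====
-- stated objective: alternative
-- what changed: A's recursive DFS (two nested recursive calls threading a visited set) is replaced by an iterative DFS driven by an explicit stack of pending cells, pushing the box cell and its partner and looping until the stack is empty.
import Mathlib
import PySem

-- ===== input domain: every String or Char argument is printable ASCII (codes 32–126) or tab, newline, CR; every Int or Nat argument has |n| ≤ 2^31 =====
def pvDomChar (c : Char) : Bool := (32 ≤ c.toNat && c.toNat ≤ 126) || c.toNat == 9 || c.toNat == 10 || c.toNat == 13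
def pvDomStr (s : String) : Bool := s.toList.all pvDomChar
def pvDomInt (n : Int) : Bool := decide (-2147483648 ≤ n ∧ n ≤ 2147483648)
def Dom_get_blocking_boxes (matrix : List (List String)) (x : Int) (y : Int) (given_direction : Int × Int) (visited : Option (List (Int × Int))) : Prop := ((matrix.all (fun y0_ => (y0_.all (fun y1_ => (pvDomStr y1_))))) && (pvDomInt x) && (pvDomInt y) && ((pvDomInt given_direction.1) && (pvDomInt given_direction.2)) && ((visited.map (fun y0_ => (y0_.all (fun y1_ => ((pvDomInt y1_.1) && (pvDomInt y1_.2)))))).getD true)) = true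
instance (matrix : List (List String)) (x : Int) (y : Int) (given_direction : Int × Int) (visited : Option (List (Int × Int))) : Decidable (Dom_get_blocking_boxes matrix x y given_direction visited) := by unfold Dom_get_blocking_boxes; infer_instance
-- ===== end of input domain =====

-- B replaces A's recursive DFS by an iterative stack-based DFS over the same cells (same
-- insertion order into visited); equivalence is about the RETURN value only — the Python A
-- mutates a caller-supplied `visited` set in place, and B performs the same mutation.
-- Both ports carry a fuel parameter solely as a totality guard; the proofs below show the
-- chosen fuel is always sufficient, so the fuel-0 default value is never returned.

-- ===== PORT A =====
-- A's recursive flood fill, step for step; fuel only guards totality (never exhausted, see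
-- goAF_eq_goA below).
def goAF (matrix : List (List String)) (dir : Int × Int) :
    Nat → Int → Int → List (Int × Int) → List (Int × Int)
  | 0, _, _, v => v
  | fuel + 1, x, y, v =>
    if (x, y) ∈ v then v
    else
      if 0 ≤ x + dir.1 ∧ x + dir.1 < (matrix.length : Int) ∧ 0 ≤ y + dir.2 ∧
          y + dir.2 < ((matrix.head?.getD []).length : Int) then
        if (PySem.List.pyGet? ((PySem.List.pyGet? matrix (x + dir.1)).getD []) (y + dir.2)).getD "" = "[" ∨
           (PySem.List.pyGet? ((PySem.List.pyGet? matrix (x + dir.1)).getD []) (y + dir.2)).getD "" = "]" then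
          if (PySem.List.pyGet? ((PySem.List.pyGet? matrix (x + dir.1)).getD []) (y + dir.2)).getD "" = "[" then
            goAF matrix dir fuel (x + dir.1) (y + dir.2 + 1)
              (goAF matrix dir fuel (x + dir.1) (y + dir.2) (v ++ [(x, y)]))
          else if (PySem.List.pyGet? ((PySem.List.pyGet? matrix (x + dir.1)).getD []) (y + dir.2)).getD "" = "]" then
            goAF matrix dir fuel (x + dir.1) (y + dir.2 - 1)
              (goAF matrix dir fuel (x + dir.1) (y + dir.2) (v ++ [(x, y)]))
          else v ++ [(x, y)]
        else v ++ [(x, y)]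
      else v ++ [(x, y)]

def get_blocking_boxes (matrix : List (List String)) (x : Int) (y : Int)
    (given_direction : Int × Int) (visited : Option (List (Int × Int))) : List (Int × Int) :=
  goAF matrix given_direction (matrix.length * ((matrix.head?.getD []).length + 2) + 2) x y
    (visited.getD [])

-- ===== PORT B =====
-- B's iterative stack-based DFS; fuel only guards totality (never exhausted, see
-- loopBF_eq_loopB below).
def loopBF (matrix : List (List String)) (dir : Int × Int) :
    Nat → List (Int × Int) → List (Int × Int) → List (Int × Int)
  | 0, v, _ => v
  | fuel + 1, v, stack =>
    match stack with
    | [] => v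
    | (cx, cy) :: s =>
      if (cx, cy) ∈ v then loopBF matrix dir fuel v s
      else
        if 0 ≤ cx + dir.1 ∧ cx + dir.1 < (matrix.length : Int) ∧ 0 ≤ cy + dir.2 ∧
            cy + dir.2 < ((matrix.head?.getD []).length : Int) then
          if (PySem.List.pyGet? ((PySem.List.pyGet? matrix (cx + dir.1)).getD []) (cy + dir.2)).getD "" = "[" then
            loopBF matrix dir fuel (v ++ [(cx, cy)])
              ((cx + dir.1, cy + dir.2) :: (cx + dir.1, cy + dir.2 + 1) :: s)
          else if (PySem.List.pyGet? ((PySem.List.pyGet? matrix (cx + dir.1)).getD []) (cy + dir.2)).getD "" = "]" then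
            loopBF matrix dir fuel (v ++ [(cx, cy)])
              ((cx + dir.1, cy + dir.2) :: (cx + dir.1, cy + dir.2 - 1) :: s)
          else loopBF matrix dir fuel (v ++ [(cx, cy)]) s
        else loopBF matrix dir fuel (v ++ [(cx, cy)]) s

def get_blocking_boxes_alt (matrix : List (List String)) (x : Int) (y : Int)
    (given_direction : Int × Int) (visited : Option (List (Int × Int))) : List (Int × Int) :=
  loopBF matrix given_direction (2 * (matrix.length * ((matrix.head?.getD []).length + 2)) + 4)
    (visited.getD []) [(x, y)]

-- ===== PRECONDITION & SPEC =====
-- Helpers used only to STATE Pre_: pvCone is the least set of unblocked cells containing the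
-- start and closed under "forward neighbour is a box half: add it and its partner" — a
-- membership/bounds fixpoint of the monotone pvStep (order-free; not a run of either port).
def pvInb (matrix : List (List String)) (c : Int × Int) : Bool :=
  decide (0 ≤ c.1 ∧ c.1 < (matrix.length : Int) ∧ 0 ≤ c.2 ∧
    c.2 < ((matrix.head?.getD []).length : Int))

def pvRead? (matrix : List (List String)) (c : Int × Int) : Option String :=
  PySem.List.pyGet? ((PySem.List.pyGet? matrix c.1).getD []) c.2

def pvSuccs (matrix : List (List String)) (dir : Int × Int) (c : Int × Int) :
    List (Int × Int) :=
  let n : Int × Int := (c.1 + dir.1, c.2 + dir.2)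
  if pvInb matrix n then
    if pvRead? matrix n = some "[" then [n, (n.1, n.2 + 1)]
    else if pvRead? matrix n = some "]" then [n, (n.1, n.2 - 1)]
    else []
  else []

def pvStep (matrix : List (List String)) (dir : Int × Int) (v0 : List (Int × Int))
    (S : Finset (Int × Int)) : Finset (Int × Int) :=
  S ∪ S.biUnion (fun c => ((pvSuccs matrix dir c).filter (fun n => ¬ n ∈ v0)).toFinset)

def pvCone (matrix : List (List String)) (x y : Int) (dir : Int × Int)
    (visited : Option (List (Int × Int))) : Finset (Int × Int) :=
  (pvStep matrix dir (visited.getD []))^[matrix.length * ((matrix.head?.getD []).length + 2) + 2]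
    (if (x, y) ∈ visited.getD [] then ∅ else {(x, y)})

-- Pre_ excludes exactly the inputs on which the Python A raises IndexError: those where some
-- cell of the flood fill's cone has its forward neighbour inside the row-0 bounds check but
-- past the end of its own (shorter) row, so that matrix[nx][ny] is evaluated out of range;
-- on every input A returns on, Pre_ holds (and B raises on exactly the same inputs).
def Pre_get_blocking_boxes (matrix : List (List String)) (x : Int) (y : Int)
    (given_direction : Int × Int) (visited : Option (List (Int × Int))) : Prop :=
  ∀ c ∈ pvCone matrix x y given_direction visited,
    ¬(pvInb matrix (c.1 + given_direction.1, c.2 + given_direction.2) = true ∧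
      pvRead? matrix (c.1 + given_direction.1, c.2 + given_direction.2) = none)
instance (matrix : List (List String)) (x : Int) (y : Int) (given_direction : Int × Int) (visited : Option (List (Int × Int))) : Decidable (Pre_get_blocking_boxes matrix x y given_direction visited) := by unfold Pre_get_blocking_boxes; infer_instance

def pvWitness_get_blocking_boxes : List (List String) × Int × Int × (Int × Int) × (Option (List (Int × Int))) :=
  ([["[", "]"], [".", "."]], 1, 0, (-1, 0), none)

def Spec_get_blocking_boxes (matrix : List (List String)) (x : Int) (y : Int) (given_direction : Int × Int) (visited : Option (List (Int × Int))) (out : List (Int × Int)) : Prop := out = get_blocking_boxes_alt matrix x y given_direction visited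
instance (matrix : List (List String)) (x : Int) (y : Int) (given_direction : Int × Int) (visited : Option (List (Int × Int))) (out : List (Int × Int)) : Decidable (Spec_get_blocking_boxes matrix x y given_direction visited out) := by unfold Spec_get_blocking_boxes; infer_instance

-- ===== CLAIM (what is proved, stated in full; the proofs are below) =====
def Claim_equal_get_blocking_boxes : Prop := ∀ (matrix : List (List String)) (x : Int) (y : Int) (given_direction : Int × Int) (visited : Option (List (Int × Int))), Dom_get_blocking_boxes matrix x y given_direction visited → Pre_get_blocking_boxes matrix x y given_direction visited → Spec_get_blocking_boxes matrix x y given_direction visited (get_blocking_boxes matrix x y given_direction visited)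

-- ===== LEMMAS AND PROOFS =====
-- Finite universe of cells any recursive call / stack push can target.
def pvBoxCells (matrix : List (List String)) : Finset (Int × Int) :=
  ((Finset.range matrix.length) ×ˢ (Finset.range ((matrix.head?.getD []).length + 2))).image
    (fun p => ((p.1 : Int), (p.2 : Int) - 1))

lemma mem_pvBoxCells (matrix : List (List String)) (a b : Int) :
    (a, b) ∈ pvBoxCells matrix ↔
      0 ≤ a ∧ a < (matrix.length : Int) ∧ -1 ≤ b ∧ b < ((matrix.head?.getD []).length : Int) + 1 := by
  simp only [pvBoxCells, Finset.mem_image, Finset.mem_product, Finset.mem_range, Prod.mk.injEq,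
    Prod.exists]
  constructor
  · rintro ⟨i, j, ⟨hi, hj⟩, rfl, rfl⟩
    refine ⟨by omega, by omega, by omega, by omega⟩
  · rintro ⟨h1, h2, h3, h4⟩
    exact ⟨a.toNat, (b + 1).toNat, ⟨by omega, by omega⟩, by omega, by omega⟩

lemma card_pvBoxCells_le (matrix : List (List String)) :
    (pvBoxCells matrix).card ≤ matrix.length * ((matrix.head?.getD []).length + 2) := by
  refine le_trans Finset.card_image_le ?_
  simp [Finset.card_product]

-- Measure of A's DFS: cells of the universe (plus the current cell) not yet visited.
def pvMu (matrix : List (List String)) (x y : Int) (v : List (Int × Int)) : Nat :=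
  ((insert (x, y) (pvBoxCells matrix)) \ v.toFinset).card

lemma pvMu_le (matrix : List (List String)) (x y : Int) (v : List (Int × Int)) :
    pvMu matrix x y v ≤ matrix.length * ((matrix.head?.getD []).length + 2) + 1 := by
  refine le_trans (Finset.card_le_card Finset.sdiff_subset) ?_
  refine le_trans (Finset.card_insert_le ..) ?_
  exact Nat.add_le_add_right (card_pvBoxCells_le matrix) 1

lemma pvMu_lt (matrix : List (List String)) {x y cx cy : Int} {v w : List (Int × Int)}
    (hc : (cx, cy) ∈ pvBoxCells matrix)
    (hxy : (x, y) ∉ v)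
    (hw : ∀ a ∈ v ++ [(x, y)], a ∈ w) :
    pvMu matrix cx cy w < pvMu matrix x y v := by
  apply Finset.card_lt_card
  rw [Finset.ssubset_def]
  constructor
  · intro e he
    simp only [Finset.mem_sdiff, Finset.mem_insert, List.mem_toFinset] at he ⊢
    obtain ⟨he1, he2⟩ := he
    refine ⟨?_, fun hv => he2 (hw e (by simp [hv]))⟩
    rcases he1 with h | h
    · exact Or.inr (h ▸ hc)
    · exact Or.inr h
  · intro hsub
    have hx : (x, y) ∈ insert (x, y) (pvBoxCells matrix) \ v.toFinset := by
      simp [hxy]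
    have h2 := hsub hx
    simp only [Finset.mem_sdiff, List.mem_toFinset] at h2
    exact h2.2 (hw (x, y) (by simp))

-- Well-founded reference version of A's DFS; the subtype carries "visited only grows",
-- which justifies termination of the second recursive call of each pair.
def goA (matrix : List (List String)) (dir : Int × Int) (x y : Int) (v : List (Int × Int)) :
    {w : List (Int × Int) // ∀ a ∈ v, a ∈ w} :=
  if hmem : (x, y) ∈ v then ⟨v, fun _ h => h⟩
  else
    if hb : 0 ≤ x + dir.1 ∧ x + dir.1 < (matrix.length : Int) ∧ 0 ≤ y + dir.2 ∧
        y + dir.2 < ((matrix.head?.getD []).length : Int) then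
      if (PySem.List.pyGet? ((PySem.List.pyGet? matrix (x + dir.1)).getD []) (y + dir.2)).getD "" = "[" ∨
         (PySem.List.pyGet? ((PySem.List.pyGet? matrix (x + dir.1)).getD []) (y + dir.2)).getD "" = "]" then
        if (PySem.List.pyGet? ((PySem.List.pyGet? matrix (x + dir.1)).getD []) (y + dir.2)).getD "" = "[" then
          ⟨(goA matrix dir (x + dir.1) (y + dir.2 + 1)
              (goA matrix dir (x + dir.1) (y + dir.2) (v ++ [(x, y)])).val).val,
           fun a h =>
             (goA matrix dir (x + dir.1) (y + dir.2 + 1)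
               (goA matrix dir (x + dir.1) (y + dir.2) (v ++ [(x, y)])).val).property a
               ((goA matrix dir (x + dir.1) (y + dir.2) (v ++ [(x, y)])).property a (by simp [h]))⟩
        else if (PySem.List.pyGet? ((PySem.List.pyGet? matrix (x + dir.1)).getD []) (y + dir.2)).getD "" = "]" then
          ⟨(goA matrix dir (x + dir.1) (y + dir.2 - 1)
              (goA matrix dir (x + dir.1) (y + dir.2) (v ++ [(x, y)])).val).val,
           fun a h =>
             (goA matrix dir (x + dir.1) (y + dir.2 - 1)
               (goA matrix dir (x + dir.1) (y + dir.2) (v ++ [(x, y)])).val).property a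
               ((goA matrix dir (x + dir.1) (y + dir.2) (v ++ [(x, y)])).property a (by simp [h]))⟩
        else ⟨v ++ [(x, y)], fun a h => by simp [h]⟩
      else ⟨v ++ [(x, y)], fun a h => by simp [h]⟩
    else ⟨v ++ [(x, y)], fun a h => by simp [h]⟩
termination_by pvMu matrix x y v
decreasing_by
  · exact pvMu_lt matrix ((mem_pvBoxCells ..).2 (by omega)) hmem (fun a h => h)
  · rename_i f _ _
    refine pvMu_lt matrix ((mem_pvBoxCells ..).2 (by omega)) hmem ?_
    exact fun a h => (f _ _).property a h
  · exact pvMu_lt matrix ((mem_pvBoxCells ..).2 (by omega)) hmem (fun a h => h)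
  · rename_i f _ _ _
    refine pvMu_lt matrix ((mem_pvBoxCells ..).2 (by omega)) hmem ?_
    exact fun a h => (f _ _).property a h

-- Measure of B's loop: unvisited cells of (stack ∪ universe), then stack length.
def pvNu (matrix : List (List String)) (v stack : List (Int × Int)) : Nat :=
  ((stack.toFinset ∪ pvBoxCells matrix) \ v.toFinset).card

lemma pvNu_le (matrix : List (List String)) (v : List (Int × Int)) (c : Int × Int)
    (s : List (Int × Int)) : pvNu matrix v s ≤ pvNu matrix v (c :: s) := by
  apply Finset.card_le_card
  intro e he
  simp only [Finset.mem_sdiff, Finset.mem_union, List.mem_toFinset, List.mem_cons] at he ⊢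
  tauto

lemma pvNu_start_le (matrix : List (List String)) (v s : List (Int × Int)) :
    pvNu matrix v s ≤ s.length + matrix.length * ((matrix.head?.getD []).length + 2) := by
  refine le_trans (Finset.card_le_card Finset.sdiff_subset) ?_
  refine le_trans (Finset.card_union_le ..) ?_
  exact Nat.add_le_add s.toFinset_card_le (card_pvBoxCells_le matrix)

lemma pvNu_lt (matrix : List (List String)) {cx cy : Int} {v s s' : List (Int × Int)}
    (hmem : (cx, cy) ∉ v)
    (hs' : ∀ a ∈ s', a ∈ s ∨ a ∈ pvBoxCells matrix) :
    pvNu matrix (v ++ [(cx, cy)]) s' < pvNu matrix v ((cx, cy) :: s) := by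
  apply Finset.card_lt_card
  rw [Finset.ssubset_def]
  constructor
  · intro e he
    simp only [Finset.mem_sdiff, Finset.mem_union, List.mem_toFinset, List.mem_cons,
      List.mem_append] at he ⊢
    obtain ⟨he1, he2⟩ := he
    refine ⟨?_, fun hv => he2 (Or.inl hv)⟩
    rcases he1 with h | h
    · rcases hs' e h with h' | h'
      · exact Or.inl (Or.inr h')
      · exact Or.inr h'
    · exact Or.inr h
  · intro hsub
    have hx : (cx, cy) ∈ (((cx, cy) :: s).toFinset ∪ pvBoxCells matrix) \ v.toFinset := by
      simp [hmem]
    have h2 := hsub hx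
    simp only [Finset.mem_sdiff, List.mem_toFinset, List.mem_append] at h2
    exact h2.2 (Or.inr (by simp))

-- Well-founded reference version of B's loop.
def loopB (matrix : List (List String)) (dir : Int × Int) (v : List (Int × Int))
    (stack : List (Int × Int)) : List (Int × Int) :=
  match stack with
  | [] => v
  | (cx, cy) :: s =>
    if hmem : (cx, cy) ∈ v then loopB matrix dir v s
    else
      if hb : 0 ≤ cx + dir.1 ∧ cx + dir.1 < (matrix.length : Int) ∧ 0 ≤ cy + dir.2 ∧
          cy + dir.2 < ((matrix.head?.getD []).length : Int) then
        if (PySem.List.pyGet? ((PySem.List.pyGet? matrix (cx + dir.1)).getD []) (cy + dir.2)).getD "" = "[" then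
          loopB matrix dir (v ++ [(cx, cy)])
            ((cx + dir.1, cy + dir.2) :: (cx + dir.1, cy + dir.2 + 1) :: s)
        else if (PySem.List.pyGet? ((PySem.List.pyGet? matrix (cx + dir.1)).getD []) (cy + dir.2)).getD "" = "]" then
          loopB matrix dir (v ++ [(cx, cy)])
            ((cx + dir.1, cy + dir.2) :: (cx + dir.1, cy + dir.2 - 1) :: s)
        else loopB matrix dir (v ++ [(cx, cy)]) s
      else loopB matrix dir (v ++ [(cx, cy)]) s
termination_by (pvNu matrix v stack, stack.length)
decreasing_by
  · rcases lt_or_eq_of_le (pvNu_le matrix v (cx, cy) s) with h | h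
    · exact Prod.Lex.left _ _ h
    · rw [h]; exact Prod.Lex.right _ (by simp)
  · exact Prod.Lex.left _ _ (pvNu_lt matrix hmem (by
      intro a ha
      simp only [List.mem_cons] at ha
      rcases ha with rfl | rfl | ha
      · exact Or.inr ((mem_pvBoxCells ..).2 (by omega))
      · exact Or.inr ((mem_pvBoxCells ..).2 (by omega))
      · exact Or.inl ha))
  · exact Prod.Lex.left _ _ (pvNu_lt matrix hmem (by
      intro a ha
      simp only [List.mem_cons] at ha
      rcases ha with rfl | rfl | ha
      · exact Or.inr ((mem_pvBoxCells ..).2 (by omega))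
      · exact Or.inr ((mem_pvBoxCells ..).2 (by omega))
      · exact Or.inl ha))
  · exact Prod.Lex.left _ _ (pvNu_lt matrix hmem (fun a ha => Or.inl ha))
  · exact Prod.Lex.left _ _ (pvNu_lt matrix hmem (fun a ha => Or.inl ha))

lemma loopB_nil (matrix : List (List String)) (dir : Int × Int) (v : List (Int × Int)) :
    loopB matrix dir v [] = v := by
  rw [loopB]

-- The heart of the equivalence: popping (x, y) and continuing equals running A's recursive
-- DFS from (x, y) first and then processing the rest of the stack.
lemma loopB_goA (matrix : List (List String)) (dir : Int × Int) (x y : Int)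
    (v : List (Int × Int)) :
    ∀ s, loopB matrix dir v ((x, y) :: s) = loopB matrix dir (goA matrix dir x y v).val s := by
  induction x, y, v using goA.induct matrix dir with
  | case1 x y v hmem =>
    intro s
    rw [loopB, goA]
    simp [dif_pos hmem]
  | case2 x y v hmem hb hor hc ih2 ih1 =>
    intro s
    rw [loopB, goA]
    simp only [dif_neg hmem, dif_pos hb, if_pos hor, if_pos hc]
    rw [ih2, ih1]
  | case3 x y v hmem hb hor hne hc ih2 ih1 =>
    intro s
    rw [loopB, goA]
    simp only [dif_neg hmem, dif_pos hb, if_pos hor, if_neg hne, if_pos hc]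
    rw [ih2, ih1]
  | case4 x y v hmem hb hor hne1 hne2 =>
    rcases hor with h | h <;> contradiction
  | case5 x y v hmem hb hor =>
    intro s
    rw [loopB, goA]
    have h1 : ¬(PySem.List.pyGet? ((PySem.List.pyGet? matrix (x + dir.1)).getD []) (y + dir.2)).getD "" = "[" :=
      fun hh => hor (Or.inl hh)
    have h2 : ¬(PySem.List.pyGet? ((PySem.List.pyGet? matrix (x + dir.1)).getD []) (y + dir.2)).getD "" = "]" :=
      fun hh => hor (Or.inr hh)
    simp only [dif_neg hmem, dif_pos hb, if_neg hor, if_neg h1, if_neg h2]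
  | case6 x y v hmem hb =>
    intro s
    rw [loopB, goA]
    simp only [dif_neg hmem, dif_neg hb]

-- Fuel adequacy for port A: any fuel above the measure computes A's DFS.
lemma goAF_eq_goA (matrix : List (List String)) (dir : Int × Int) :
    ∀ (F : Nat) (x y : Int) (v : List (Int × Int)), pvMu matrix x y v < F →
      goAF matrix dir F x y v = (goA matrix dir x y v).val := by
  intro F
  induction F with
  | zero => intro x y v h; omega
  | succ G ih =>
    intro x y v hF
    rw [goAF, goA]
    by_cases hmem : (x, y) ∈ v
    · simp [dif_pos hmem, if_pos hmem]
    · simp only [dif_neg hmem, if_neg hmem]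
      by_cases hb : 0 ≤ x + dir.1 ∧ x + dir.1 < (matrix.length : Int) ∧ 0 ≤ y + dir.2 ∧
          y + dir.2 < ((matrix.head?.getD []).length : Int)
      · simp only [dif_pos hb, if_pos hb]
        have hcell : ((x + dir.1, y + dir.2) : Int × Int) ∈ pvBoxCells matrix :=
          (mem_pvBoxCells ..).2 (by omega)
        have hinner : pvMu matrix (x + dir.1) (y + dir.2) (v ++ [(x, y)]) < G :=
          Nat.lt_of_lt_of_le (pvMu_lt matrix hcell hmem (fun a h => h)) (Nat.lt_succ_iff.mp hF)
        split_ifs with hor hc hc2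
        · rw [ih _ _ _ hinner]
          refine ih _ _ _ ?_
          have hcell' : ((x + dir.1, y + dir.2 + 1) : Int × Int) ∈ pvBoxCells matrix :=
            (mem_pvBoxCells ..).2 (by omega)
          refine Nat.lt_of_lt_of_le ?_ (Nat.lt_succ_iff.mp hF)
          exact pvMu_lt matrix hcell' hmem
            (fun a h => (goA matrix dir (x + dir.1) (y + dir.2) (v ++ [(x, y)])).property a h)
        · rw [ih _ _ _ hinner]
          refine ih _ _ _ ?_
          have hcell' : ((x + dir.1, y + dir.2 - 1) : Int × Int) ∈ pvBoxCells matrix :=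
            (mem_pvBoxCells ..).2 (by omega)
          refine Nat.lt_of_lt_of_le ?_ (Nat.lt_succ_iff.mp hF)
          exact pvMu_lt matrix hcell' hmem
            (fun a h => (goA matrix dir (x + dir.1) (y + dir.2) (v ++ [(x, y)])).property a h)
        · rfl
        · rfl
      · simp [dif_neg hb, if_neg hb]

-- Fuel adequacy for port B: any fuel above 2·measure + stack length computes B's loop.
lemma loopBF_eq_loopB (matrix : List (List String)) (dir : Int × Int) :
    ∀ (F : Nat) (v s : List (Int × Int)), 2 * pvNu matrix v s + s.length < F →
      loopBF matrix dir F v s = loopB matrix dir v s := by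
  intro F
  induction F with
  | zero => intro v s h; omega
  | succ G ih =>
    intro v s hF
    match s with
    | [] => rw [loopBF, loopB]
    | (cx, cy) :: s =>
      rw [loopBF, loopB]
      by_cases hmem : (cx, cy) ∈ v
      · simp only [if_pos hmem, dif_pos hmem]
        refine ih _ _ ?_
        have := pvNu_le matrix v (cx, cy) s
        simp only [List.length_cons] at hF
        omega
      · simp only [if_neg hmem, dif_neg hmem]
        by_cases hb : 0 ≤ cx + dir.1 ∧ cx + dir.1 < (matrix.length : Int) ∧ 0 ≤ cy + dir.2 ∧
            cy + dir.2 < ((matrix.head?.getD []).length : Int)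
        · simp only [if_pos hb, dif_pos hb]
          have hc1 : ((cx + dir.1, cy + dir.2) : Int × Int) ∈ pvBoxCells matrix :=
            (mem_pvBoxCells ..).2 (by omega)
          split_ifs with hc hc2
          · refine ih _ _ ?_
            have hlt := pvNu_lt matrix (s' := (cx + dir.1, cy + dir.2) ::
                (cx + dir.1, cy + dir.2 + 1) :: s) hmem (by
              intro a ha
              simp only [List.mem_cons] at ha
              rcases ha with rfl | rfl | ha
              · exact Or.inr hc1
              · exact Or.inr ((mem_pvBoxCells ..).2 (by omega))
              · exact Or.inl ha)
            simp only [List.length_cons] at hF ⊢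
            omega
          · refine ih _ _ ?_
            have hlt := pvNu_lt matrix (s' := (cx + dir.1, cy + dir.2) ::
                (cx + dir.1, cy + dir.2 - 1) :: s) hmem (by
              intro a ha
              simp only [List.mem_cons] at ha
              rcases ha with rfl | rfl | ha
              · exact Or.inr hc1
              · exact Or.inr ((mem_pvBoxCells ..).2 (by omega))
              · exact Or.inl ha)
            simp only [List.length_cons] at hF ⊢
            omega
          · refine ih _ _ ?_
            have hlt := pvNu_lt matrix (s' := s) hmem (fun a ha => Or.inl ha)
            simp only [List.length_cons] at hF ⊢
            omega
        · simp only [if_neg hb, dif_neg hb]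
          refine ih _ _ ?_
          have hlt := pvNu_lt matrix (s' := s) hmem (fun a ha => Or.inl ha)
          simp only [List.length_cons] at hF ⊢
          omega

-- ===== VERDICT (by name: the statement is the Claim_ definition above) =====
theorem get_blocking_boxes_spec : Claim_equal_get_blocking_boxes := by
  intro matrix x y dir visited _ _
  unfold Spec_get_blocking_boxes get_blocking_boxes get_blocking_boxes_alt
  rw [goAF_eq_goA matrix dir _ x y _ (Nat.lt_of_le_of_lt (pvMu_le ..) (by omega))]
  rw [loopBF_eq_loopB matrix dir _ _ _ (by
    have := pvNu_start_le matrix (visited.getD []) [(x, y)]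
    simp only [List.length_singleton] at this ⊢
    omega)]
  rw [loopB_goA, loopB_nil]
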